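-- pv_equiv track=rewrite | github.com/intracom-telecom-sdn/nstat | stress_test/html_generation.py | insert_plots
-- ===== SOURCE A (Python) =====
-- def insert_plots(plots_list):
--     """ Gets a list of dictionaries that describes the plots of the report,
--     and generates the corresponded html code.
--
--     :param plots_list: A list of dictionaries with the plots description.
--     :returns: The corresponded html code to insert the plots.
--     :rtype: str
--     :type plots_list: <list<dictionary>>
--     """
--
--     num_plots = len(plots_list)
--     plots_html = ''
--     if num_plots:
--         plots_html = plots_html + '<div class=\"graph-container\">'
--         graph_float = 'left'
--
--         for plot_id in list(range(0, num_plots)):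
--             if plots_list[plot_id]['plot_filename']:
--
--                 # Adding a graph image in document.
--                 plots_html = plots_html + \
--                     '<img class=\"graph-' + graph_float + '\" src=\"' + \
--                 str(plots_list[plot_id]['plot_filename']) + \
--                     '.png\" alt=\"result graph\" />'
--
--                 # Changing the page alignment of the next inserted graph image.
--                 # Also place a content break to have images group of 2.
--                 if graph_float == 'right':
--                     plots_html = plots_html + \
--                         '<div class=\"float-cleaner\"><br></div>'
--                     graph_float = 'left'
--                 else:
--                     graph_float = 'right'
--
--         plots_html = plots_html + '</div>'
--         plots_html = plots_html + '<div class=\"float-cleaner\"><br></div>'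
--
--     plots_html = plots_html + '<hr>'
--     return plots_html
-- ===== SOURCE B (Python) =====
-- def _img(side, name):
--     return ('<img class="graph-' + side + '" src="' + name +
--             '.png" alt="result graph" />')
--
--
-- def insert_plots(plots_list):
--     """Same HTML, built by filtering the rendered filenames first and then
--     emitting them two at a time (left img, right img, float-cleaner)."""
--     names = [str(p['plot_filename']) for p in plots_list if p['plot_filename']]
--     parts = []
--     if plots_list:
--         parts.append('<div class="graph-container">')
--         i = 0
--         while i + 1 < len(names):
--             parts.append(_img('left', names[i]))
--             parts.append(_img('right', names[i + 1]))
--             parts.append('<div class="float-cleaner"><br></div>')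
--             i += 2
--         if i < len(names):
--             parts.append(_img('left', names[i]))
--         parts.append('</div>')
--         parts.append('<div class="float-cleaner"><br></div>')
--     parts.append('<hr>')
--     return ''.join(parts)
-- ===== Notes on version B (the rewrite author's own statement) =====
-- stated objective: alternative
-- what changed: Instead of one indexed loop threading a left/right alignment flag through the HTML string, B first filters the truthy plot filenames into a list and then renders them two at a time (left img, right img, float-cleaner) into a parts list joined at the end; the container/tail divs stay guarded by the original list being nonempty.
import Mathlib
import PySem

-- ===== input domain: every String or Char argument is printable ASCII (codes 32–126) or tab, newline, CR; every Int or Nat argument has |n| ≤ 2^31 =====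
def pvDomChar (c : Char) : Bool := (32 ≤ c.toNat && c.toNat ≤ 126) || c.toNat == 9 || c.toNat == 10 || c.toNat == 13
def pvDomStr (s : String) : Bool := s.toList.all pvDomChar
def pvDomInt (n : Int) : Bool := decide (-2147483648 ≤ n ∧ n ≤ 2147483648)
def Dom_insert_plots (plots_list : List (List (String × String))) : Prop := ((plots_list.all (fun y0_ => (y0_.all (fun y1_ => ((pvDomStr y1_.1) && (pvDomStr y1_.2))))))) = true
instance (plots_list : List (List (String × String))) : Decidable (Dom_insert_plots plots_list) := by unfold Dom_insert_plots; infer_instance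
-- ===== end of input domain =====

-- B builds the same HTML by filtering the truthy filenames first and rendering
-- them two at a time, instead of threading a left/right flag through one loop
-- (objective: alternative decomposition; same cost).

-- dict lookup d['plot_filename'] (first match; Pre_ guarantees the key is present)
def pfname (p : List (String × String)) : String := (p.lookup "plot_filename").getD ""

-- ===== PORT A =====
-- A's loop body: the current (html, graph_float) state updated by one dict's filename
def stepN (s : String × String) (v : String) : String × String :=
  if v ≠ "" then
    let h := s.1 ++ "<img class=\"graph-" ++ s.2 ++ "\" src=\"" ++ v ++
             ".png\" alt=\"result graph\" />"
    if s.2 = "right" then (h ++ "<div class=\"float-cleaner\"><br></div>", "left")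
    else (h, "right")
  else s

def insert_plots (plots_list : List (List (String × String))) : String :=
  let num_plots : Int := plots_list.length
  let plots_html : String := ""
  if num_plots ≠ 0 then
    let plots_html := plots_html ++ "<div class=\"graph-container\">"
    let st := (PySem.List.pyRange 0 num_plots 1).foldl
      (fun (s : String × String) plot_id =>
        stepN s (pfname (PySem.List.pyGetD plots_list plot_id [])))
      (plots_html, "left")
    st.1 ++ "</div>" ++ "<div class=\"float-cleaner\"><br></div>" ++ "<hr>"
  else plots_html ++ "<hr>"

-- ===== PORT B =====
def imgTag (side v : String) : String :=
  "<img class=\"graph-" ++ side ++ "\" src=\"" ++ v ++ ".png\" alt=\"result graph\" />"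

-- the while loop over names, two at a time
def renderPairs : List String → String
  | a :: b :: rest =>
      imgTag "left" a ++ imgTag "right" b ++
      "<div class=\"float-cleaner\"><br></div>" ++ renderPairs rest
  | [a] => imgTag "left" a
  | [] => ""

def insert_plots_alt (plots_list : List (List (String × String))) : String :=
  let names := plots_list.filterMap (fun p =>
    let v := pfname p
    if v ≠ "" then some v else none)
  (if plots_list ≠ [] then
     "<div class=\"graph-container\">" ++ renderPairs names ++ "</div>" ++
     "<div class=\"float-cleaner\"><br></div>"
   else "") ++ "<hr>"

-- ===== PRECONDITION & SPEC =====
-- Pre_ excludes exactly the inputs where some element dict lacks the key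
-- 'plot_filename', on which the Python A (and B) raises KeyError.
def Pre_insert_plots (plots_list : List (List (String × String))) : Prop :=
  ∀ p ∈ plots_list, (p.lookup "plot_filename").isSome = true
instance (plots_list : List (List (String × String))) : Decidable (Pre_insert_plots plots_list) := by unfold Pre_insert_plots; infer_instance

def pvWitness_insert_plots : (List (List (String × String))) :=
  [[("plot_filename", "a")], [("plot_filename", "")], [("plot_filename", "b")],
   [("plot_filename", "c")]]

def Spec_insert_plots (plots_list : List (List (String × String))) (out : String) : Prop := out = insert_plots_alt plots_list
instance (plots_list : List (List (String × String))) (out : String) : Decidable (Spec_insert_plots plots_list out) := by unfold Spec_insert_plots; infer_instance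

-- ===== CLAIM (what is proved, stated in full; the proofs are below) =====
def Claim_equal_insert_plots : Prop := ∀ (plots_list : List (List (String × String))), Dom_insert_plots plots_list → Pre_insert_plots plots_list → Spec_insert_plots plots_list (insert_plots plots_list)

-- ===== LEMMAS AND PROOFS =====

-- folding A's step over the dicts = folding it over the filtered filenames
lemma fold_filterMap (ds : List (List (String × String))) (st : String × String) :
    ds.foldl (fun s p => stepN s (pfname p)) st
      = (ds.filterMap (fun p => let v := pfname p; if v ≠ "" then some v else none)).foldl
          stepN st := by
  induction ds generalizing st with
  | nil => rfl
  | cons p ds ih =>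
      rw [List.foldl_cons, ih, List.filterMap_cons]
      by_cases h : pfname p = ""
      · simp [h, stepN]
      · simp [h]

-- folding the step from the 'left' state over nonempty names renders them pairwise
lemma fold_stepN (ns : List String) (acc : String) (hne : ∀ x ∈ ns, x ≠ "") :
    (ns.foldl stepN (acc, "left")).1 = acc ++ renderPairs ns := by
  induction ns using renderPairs.induct generalizing acc with
  | case3 => simp [renderPairs]
  | case2 a =>
      have ha : a ≠ "" := hne a (by simp)
      simp [renderPairs, stepN, ha, imgTag, String.append_assoc]
  | case1 a b rest ih =>
      have ha : a ≠ "" := hne a (by simp)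
      have hb : b ≠ "" := hne b (by simp)
      simp only [List.foldl_cons]
      rw [show stepN (acc, "left") a
            = (acc ++ "<img class=\"graph-" ++ "left" ++ "\" src=\"" ++ a ++
               ".png\" alt=\"result graph\" />", "right") by simp [stepN, ha]]
      rw [show stepN (acc ++ "<img class=\"graph-" ++ "left" ++ "\" src=\"" ++ a ++
               ".png\" alt=\"result graph\" />", "right") b
            = (acc ++ "<img class=\"graph-" ++ "left" ++ "\" src=\"" ++ a ++
               ".png\" alt=\"result graph\" />" ++ "<img class=\"graph-" ++ "right" ++
               "\" src=\"" ++ b ++ ".png\" alt=\"result graph\" />" ++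
               "<div class=\"float-cleaner\"><br></div>", "left") by simp [stepN, hb]]
      rw [ih _ (fun x hx => hne x (by simp [hx]))]
      simp only [renderPairs, imgTag, String.append_assoc]

-- ===== VERDICT (by name: the statement is the Claim_ definition above) =====
theorem insert_plots_spec : Claim_equal_insert_plots := by
  intro plots_list _ _
  unfold Spec_insert_plots insert_plots insert_plots_alt
  by_cases h : plots_list = []
  · simp [h]
  · have hlen : (plots_list.length : Int) ≠ 0 := by simp [h]
    simp only [h, hlen, ne_eq, not_false_eq_true, if_true]
    rw [PySem.List.foldl_pyRange_zero_pyGetD' (f := fun s v => stepN s (pfname v))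
        (xs := plots_list) (d := ([] : List (String × String)))
        (init := ("" ++ "<div class=\"graph-container\">", "left"))]
    rw [fold_filterMap, fold_stepN _ _ (by
      intro x hx
      simp only [List.mem_filterMap] at hx
      obtain ⟨p, -, hp⟩ := hx
      by_cases hv : pfname p = "" <;> simp [hv] at hp
      exact hp ▸ hv)]
    simp [String.append_assoc]
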